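-- pv_equiv track=rewrite | github.com/liyingji1996/Data-Debias | loader/sst2.py | template
-- ===== SOURCE A (Python) =====
-- words4 = [["woman", "man"], ["women", "men"], ["girl", "boy"], ["girls", "boys"], ["she", "he"], ["mother", "father"], ["daughter", "son"], ["gal", "guy"], ["female", "male"], ["her", "his"], ["herself", "himself"], ["Mary", "John"]]
--
-- words3 = ["woman", "man", "women", "men", "girl", "boy", "girls", "boys", "she", "he", "mother", "father", "daughter", "son", "gal", "guy", "female", "male", "her", "his", "herself", "himself", "Mary", "John"]
--
-- def template(text, all_pairs):
--     for i, (female, male) in enumerate(words4):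
--         sent_list = text.lower().split(' ')
--         sent_list_f = []
--         sent_list_m = []
--         match = 0
--         for j in range(len(sent_list)):
--             if sent_list[j] in words3:
--                 match = 1
--                 sent_list_f.append(female)
--                 sent_list_m.append(male)
--             else:
--                 sent_list_f.append(sent_list[j])
--                 sent_list_m.append(sent_list[j])
--         if match:
--             sent_f = ' '.join(sent_list_f)
--             sent_m = ' '.join(sent_list_m)
--             all_pairs[i]['f'].append(sent_f)
--             all_pairs[i]['m'].append(sent_m)
--     return match, all_pairs
-- ===== SOURCE B (Python) =====
-- words4 = [["woman", "man"], ["women", "men"], ["girl", "boy"], ["girls", "boys"], ["she", "he"], ["mother", "father"], ["daughter", "son"], ["gal", "guy"], ["female", "male"], ["her", "his"], ["herself", "himself"], ["Mary", "John"]]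
--
-- words3 = ["woman", "man", "women", "men", "girl", "boy", "girls", "boys", "she", "he", "mother", "father", "daughter", "son", "gal", "guy", "female", "male", "her", "his", "herself", "himself", "Mary", "John"]
--
-- def template(text, all_pairs):
--     # word-major single pass: grow all 12 (f, m) sentence pairs at once,
--     # one membership test per word, no per-pair rebuild/join
--     sents = [("", "")] * len(words4)
--     match, first = 0, True
--     for word in text.lower().split(' '):
--         hit = word in words3
--         if hit:
--             match = 1
--         sep = '' if first else ' '
--         sents = [(sf + sep + (f if hit else word), sm + sep + (m if hit else word))
--                  for (f, m), (sf, sm) in zip(words4, sents)]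
--         first = False
--     if match:
--         for i, (sf, sm) in enumerate(sents):
--             all_pairs[i]['f'].append(sf)
--             all_pairs[i]['m'].append(sm)
--     return match, all_pairs
-- ===== Notes on version B (the rewrite author's own statement) =====
-- stated objective: alternative
-- what changed: B transposes the loops: instead of A's pair-major scheme (for each of the 12 pairs, re-split the text, rebuild two token lists with an inner words3 scan per word, then join), B makes ONE word-major pass over the split text, growing all 12 (f, m) sentence strings simultaneously by concatenation with one membership test per word, then appends them if any word matched.
import Mathlib
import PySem

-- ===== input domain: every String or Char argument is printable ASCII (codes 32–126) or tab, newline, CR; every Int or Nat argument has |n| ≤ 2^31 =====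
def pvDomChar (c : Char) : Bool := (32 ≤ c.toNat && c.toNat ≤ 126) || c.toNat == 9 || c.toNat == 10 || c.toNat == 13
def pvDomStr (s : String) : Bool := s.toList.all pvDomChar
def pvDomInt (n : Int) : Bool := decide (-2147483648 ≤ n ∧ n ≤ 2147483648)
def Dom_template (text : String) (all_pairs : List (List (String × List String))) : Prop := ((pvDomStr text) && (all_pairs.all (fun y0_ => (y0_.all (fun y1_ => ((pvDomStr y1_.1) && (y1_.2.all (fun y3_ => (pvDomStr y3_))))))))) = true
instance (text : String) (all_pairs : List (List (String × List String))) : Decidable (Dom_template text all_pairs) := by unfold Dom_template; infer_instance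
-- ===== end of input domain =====

-- B rewrite (alternative): A loops pair-major (for each of the 12 pairs, re-split the text and rebuild
-- token lists, then join); B loops word-major in ONE pass, growing all 12 (f, m) sentence strings at
-- once by concatenation. Both Pythons mutate all_pairs in place; the equivalence proved is about the
-- returned value.

-- ===== PORT A =====
-- module constants (shared context of both programs)
def words4 : List (String × String) := [("woman", "man"), ("women", "men"), ("girl", "boy"), ("girls", "boys"), ("she", "he"), ("mother", "father"), ("daughter", "son"), ("gal", "guy"), ("female", "male"), ("her", "his"), ("herself", "himself"), ("Mary", "John")]

def words3 : List String := ["woman", "man", "women", "men", "girl", "boy", "girls", "boys", "she", "he", "mother", "father", "daughter", "son", "gal", "guy", "female", "male", "her", "his", "herself", "himself", "Mary", "John"]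

-- all_pairs[i]['f'].append(sf); all_pairs[i]['m'].append(sm)  (shared by both Pythons, statement for statement)
def pvAppendFM (d : List (String × List String)) (sf sm : String) : List (String × List String) :=
  (((PySem.Dict.mk d).modify "f" [] (· ++ [sf])).modify "m" [] (· ++ [sm])).items

def template (text : String) (all_pairs : List (List (String × List String))) : Int × (List (List (String × List String))) :=
  (PySem.List.enumerate words4).foldl (fun st p =>
    let sent_list := (PySem.Str.split? (PySem.Str.lower text) " ").getD []   -- sep " " ≠ "": never none
    -- for j in range(len(sent_list)): … sent_list[j] …  = one pass over sent_list
    let r := sent_list.foldl (fun (acc : Int × List String × List String) w =>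
        if words3.contains w then (1, acc.2.1 ++ [p.2.1], acc.2.2 ++ [p.2.2])
        else (acc.1, acc.2.1 ++ [w], acc.2.2 ++ [w])) ((0 : Int), ([] : List String), ([] : List String))
    if r.1 ≠ 0 then
      let sent_f := PySem.Str.join " " r.2.1
      let sent_m := PySem.Str.join " " r.2.2
      (r.1, st.2.modify p.1.toNat (fun d => pvAppendFM d sent_f sent_m))
    else (r.1, st.2)) ((0 : Int), all_pairs)

-- ===== PORT B =====
def template_alt (text : String) (all_pairs : List (List (String × List String))) : Int × (List (List (String × List String))) :=
  let init : List (String × String) := List.replicate words4.length ("", "")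
  -- for word in text.lower().split(' '): one pass, state (match, sents, first)
  let st := ((PySem.Str.split? (PySem.Str.lower text) " ").getD []).foldl
    (fun (acc : Int × List (String × String) × Bool) word =>
      let hit := words3.contains word
      let mtch := if hit then (1 : Int) else acc.1
      let sep := if acc.2.2 then "" else " "
      let sents := (words4.zip acc.2.1).map (fun q =>
          (q.2.1 ++ sep ++ (if hit then q.1.1 else word),
           q.2.2 ++ sep ++ (if hit then q.1.2 else word)))
      (mtch, sents, false)) ((0 : Int), init, true)
  if st.1 ≠ 0 then
    (st.1, (PySem.List.enumerate st.2.1).foldl (fun ap p =>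
        ap.modify p.1.toNat (fun d => pvAppendFM d p.2.1 p.2.2)) all_pairs)
  else (st.1, all_pairs)

-- ===== PRECONDITION & SPEC =====
-- Pre_ excludes exactly the inputs where Python A raises: when the text contains a gendered word,
-- A indexes all_pairs[0..11] and their keys 'f' and 'm' (IndexError / KeyError otherwise).
def Pre_template (text : String) (all_pairs : List (List (String × List String))) : Prop :=
  (∃ w ∈ (PySem.Str.split? (PySem.Str.lower text) " ").getD [], w ∈ words3) →
    (12 ≤ all_pairs.length ∧ ∀ d ∈ all_pairs.take 12,
      (PySem.Dict.mk d).contains "f" = true ∧ (PySem.Dict.mk d).contains "m" = true)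
instance (text : String) (all_pairs : List (List (String × List String))) : Decidable (Pre_template text all_pairs) := by unfold Pre_template; infer_instance

def pvWitness_template : String × (List (List (String × List String))) :=
  ("she runs", [[("f", []), ("m", [])], [("f", []), ("m", [])], [("f", []), ("m", [])], [("f", []), ("m", [])], [("f", []), ("m", [])], [("f", []), ("m", [])], [("f", []), ("m", [])], [("f", []), ("m", [])], [("f", []), ("m", [])], [("f", []), ("m", [])], [("f", []), ("m", [])], [("f", []), ("m", [])]])

def Spec_template (text : String) (all_pairs : List (List (String × List String))) (out : Int × (List (List (String × List String)))) : Prop := out = template_alt text all_pairs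
instance (text : String) (all_pairs : List (List (String × List String))) (out : Int × (List (List (String × List String)))) : Decidable (Spec_template text all_pairs out) := by unfold Spec_template; infer_instance

-- ===== CLAIM (what is proved, stated in full; the proofs are below) =====
def Claim_equal_template : Prop := ∀ (text : String) (all_pairs : List (List (String × List String))), Dom_template text all_pairs → Pre_template text all_pairs → Spec_template text all_pairs (template text all_pairs)

-- ===== LEMMAS AND PROOFS =====

-- the word replacement both programs perform
def pvRepl (f w : String) : String := if words3.contains w then f else w

-- the tail of an incrementally built sentence: " w1 w2 …" with each word replaced
def pvTail (f : String) : List String → String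
  | [] => ""
  | w :: ws => " " ++ pvRepl f w ++ pvTail f ws

-- A's inner loop, characterised
theorem pv_innerA (f m : String) (sent : List String) (b : Int) (xs ys : List String) :
    sent.foldl (fun (acc : Int × List String × List String) w =>
        if words3.contains w then (1, acc.2.1 ++ [f], acc.2.2 ++ [m])
        else (acc.1, acc.2.1 ++ [w], acc.2.2 ++ [w])) (b, xs, ys)
    = ((if sent.any (fun w => words3.contains w) then 1 else b),
       xs ++ sent.map (pvRepl f),
       ys ++ sent.map (pvRepl m)) := by
  induction sent generalizing b xs ys with
  | nil => simp
  | cons h t ih =>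
    by_cases hc : words3.contains h = true
    · rw [List.foldl_cons, if_pos hc, ih]
      rw [List.contains_iff_mem] at hc
      simp [pvRepl, hc]
    · rw [List.foldl_cons, if_neg hc, ih]
      rw [List.contains_iff_mem] at hc
      simp [pvRepl, hc]

-- when no word matches, A's outer loop keeps the state (0, all_pairs)
theorem pv_fold_none {ι : Type} (l : List ι) (ap : List (List (String × List String))) :
    l.foldl (fun (st : Int × List (List (String × List String))) (_ : ι) => ((0 : Int), st.2)) (0, ap) = (0, ap) := by
  induction l with
  | nil => rfl
  | cons h t ih => simpa using ih

-- when some word matches, A's outer loop is a fold on the pairs component with match pinned to 1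
theorem pv_fold_one (sf sm : (Int × String × String) → String)
    (l : List (Int × String × String)) (hl : l ≠ []) (b : Int) (ap : List (List (String × List String))) :
    l.foldl (fun (st : Int × List (List (String × List String))) p =>
        ((1 : Int), st.2.modify p.1.toNat fun d => pvAppendFM d (sf p) (sm p))) (b, ap)
      = (1, l.foldl (fun ap p => ap.modify p.1.toNat fun d => pvAppendFM d (sf p) (sm p)) ap) := by
  induction l generalizing b ap with
  | nil => exact absurd rfl hl
  | cons x t ih =>
    rw [List.foldl_cons, List.foldl_cons]
    cases t with
    | nil => rfl
    | cons y s => exact ih (by simp) 1 _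

theorem pv_enum_ne : PySem.List.enumerate words4 ≠ [] := by decide

-- zipping a list with its own image and mapping = a single map
theorem pv_zip_map_self {α β γ : Type} (l : List α) (h : α → β) (g : α × β → γ) :
    ((l.zip (l.map h)).map g) = l.map (fun a => g (a, h a)) := by
  induction l with
  | nil => rfl
  | cons x t ih => simp [ih]

-- B's word loop after the first word (flag = false), characterised
theorem pv_word_fold (ws : List String) (b : Int) (pf pm : String × String → String) :
    ws.foldl (fun (acc : Int × List (String × String) × Bool) word =>
      let hit := words3.contains word
      let mtch := if hit then (1 : Int) else acc.1
      let sep := if acc.2.2 then "" else " "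
      let sents := (words4.zip acc.2.1).map (fun q =>
          (q.2.1 ++ sep ++ (if hit then q.1.1 else word),
           q.2.2 ++ sep ++ (if hit then q.1.2 else word)))
      (mtch, sents, false)) (b, words4.map (fun p => (pf p, pm p)), false)
    = ((if ws.any (fun w => words3.contains w) then 1 else b),
       words4.map (fun p => (pf p ++ pvTail p.1 ws, pm p ++ pvTail p.2 ws)), false) := by
  induction ws generalizing b pf pm with
  | nil => simp [pvTail]
  | cons w t ih =>
    rw [List.foldl_cons]
    simp only [pv_zip_map_self, Bool.false_eq_true, reduceIte]
    rw [ih]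
    by_cases hc : words3.contains w = true <;>
      by_cases ht : t.any (fun w => words3.contains w) = true <;>
        simp only [pvTail, pvRepl, List.any_cons, hc, ht, Bool.true_or, Bool.false_or,
          Bool.or_false, Bool.or_true, Bool.false_eq_true, reduceIte, String.append_assoc]

-- the joined replaced sentence = head word + incrementally built tail
theorem pv_join_eq (f : String) (w : String) (ws : List String) :
    PySem.Str.join " " ((w :: ws).map (pvRepl f)) = pvRepl f w ++ pvTail f ws := by
  induction ws generalizing w with
  | nil =>
    simp [pvTail, PySem.Str.join, PySem.Chars.join_singleton, String.append_empty]
  | cons v vs ih =>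
    rw [List.map_cons, List.map_cons]
    rw [show (pvRepl f w :: pvRepl f v :: vs.map (pvRepl f))
          = pvRepl f w :: ((v :: vs).map (pvRepl f)) from by simp]
    rw [show PySem.Str.join " " (pvRepl f w :: (v :: vs).map (pvRepl f))
          = pvRepl f w ++ " " ++ PySem.Str.join " " ((v :: vs).map (pvRepl f)) from by
      simp only [PySem.Str.join, List.map_cons, PySem.Chars.join_cons_cons,
        String.ofList_append, String.ofList_toList]]
    rw [ih]
    simp [pvTail, String.append_assoc]

-- enumerate of a mapped list
theorem pv_enumerate_map {α β : Type} (l : List α) (h : α → β) (s : Int) :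
    PySem.List.enumerate (l.map h) s = (PySem.List.enumerate l s).map (fun q => (q.1, h q.2)) := by
  induction l generalizing s with
  | nil => rfl
  | cons x t ih => simp [PySem.List.enumerate_cons, ih]

-- ===== VERDICT (by name: the statement is the Claim_ definition above) =====
set_option maxHeartbeats 1000000 in
theorem template_spec : Claim_equal_template := by
  intro text all_pairs _ _
  unfold Spec_template template template_alt
  rw [show (List.replicate words4.length (("", "") : String × String))
        = words4.map (fun _ => ("", "")) from by decide]
  simp only [pv_innerA, List.nil_append]
  cases hs : (PySem.Str.split? (PySem.Str.lower text) " ").getD [] with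
  | nil =>
    simp only [List.foldl_nil, List.any_nil, List.map_nil, Bool.false_eq_true, reduceIte,
      ne_eq, not_true_eq_false, reduceCtorEq]
    exact pv_fold_none _ _
  | cons w ws =>
    rw [List.foldl_cons]
    simp only [pv_zip_map_self, Bool.false_eq_true, reduceIte]
    rw [pv_word_fold]
    simp only [List.any_cons]
    by_cases hc : words3.contains w = true <;>
      by_cases ht : (ws.any fun w => words3.contains w) = true
    · simp only [hc, ht, Bool.true_or, Bool.false_or, Bool.or_false, Bool.or_true,
        Bool.false_eq_true, reduceIte, ne_eq, one_ne_zero, not_false_eq_true,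
        pv_join_eq, pv_enumerate_map, List.foldl_map]
      rw [pv_fold_one _ _ (PySem.List.enumerate words4) pv_enum_ne 0 all_pairs]
      simp only [pvRepl, hc, String.empty_append, reduceIte]
    · simp only [hc, ht, Bool.true_or, Bool.false_or, Bool.or_false, Bool.or_true,
        Bool.false_eq_true, reduceIte, ne_eq, one_ne_zero, not_false_eq_true,
        pv_join_eq, pv_enumerate_map, List.foldl_map]
      rw [pv_fold_one _ _ (PySem.List.enumerate words4) pv_enum_ne 0 all_pairs]
      simp only [pvRepl, hc, String.empty_append, reduceIte]
    · rw [Bool.not_eq_true] at hc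
      simp only [hc, ht, Bool.true_or, Bool.false_or, Bool.or_false, Bool.or_true,
        Bool.false_eq_true, reduceIte, ne_eq, one_ne_zero, not_false_eq_true,
        pv_join_eq, pv_enumerate_map, List.foldl_map]
      rw [pv_fold_one _ _ (PySem.List.enumerate words4) pv_enum_ne 0 all_pairs]
      simp only [pvRepl, hc, Bool.false_eq_true, String.empty_append, reduceIte]
    · simp only [hc, ht, Bool.or_false, Bool.false_eq_true, reduceIte, ne_eq,
        not_true_eq_false, reduceCtorEq]
      exact pv_fold_none _ _
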